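-- pv_equiv track=rewrite | github.com/NewLord8951/block | block6/task6.43.py | solve
-- ===== SOURCE A (Python) =====
-- def solve(sequence):
--
--     count_same_groups = 0
--     distinct_numbers = set()
--
--     n = len(sequence)
--
--     current_number = sequence[0]
--     current_count = 1
--     distinct_numbers.add(current_number)
--
--     for i in range(1, n):
--         if sequence[i] == current_number:
--             current_count += 1
--         else:
--             if current_count > 1:
--                 count_same_groups += 1
--             current_number = sequence[i]
--             current_count = 1
--         distinct_numbers.add(sequence[i])
--
--     if current_count > 1:
--         count_same_groups += 1
--
--     return count_same_groups, len(distinct_numbers)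
-- ===== SOURCE B (Python) =====
-- def solve(sequence):
--     eq = [x == y for x, y in zip(sequence, sequence[1:])]
--     runs = sum(eq) - sum(a and b for a, b in zip(eq, eq[1:]))
--     return runs, len(set(sequence))
-- ===== Notes on version B (the rewrite author's own statement) =====
-- stated objective: alternative
-- what changed: Replaces the stateful current_number/current_count loop by a stateless pairwise closed form: runs-of-length>1 = (# adjacent equal pairs) - (# overlapping adjacent equal pairs, i.e. equal triples), and distinct = len(set(sequence)).
import Mathlib
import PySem

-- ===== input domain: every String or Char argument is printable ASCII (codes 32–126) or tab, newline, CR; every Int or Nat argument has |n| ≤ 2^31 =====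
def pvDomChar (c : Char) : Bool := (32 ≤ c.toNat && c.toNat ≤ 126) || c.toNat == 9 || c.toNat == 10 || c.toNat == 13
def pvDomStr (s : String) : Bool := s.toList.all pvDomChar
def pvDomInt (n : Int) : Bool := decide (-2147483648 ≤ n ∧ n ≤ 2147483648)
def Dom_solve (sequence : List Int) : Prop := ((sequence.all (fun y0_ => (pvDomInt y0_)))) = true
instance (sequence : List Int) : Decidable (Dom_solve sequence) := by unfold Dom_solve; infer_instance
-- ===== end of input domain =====

-- B replaces A's stateful run-tracking loop by a stateless pairwise closed form; equal values proved on all non-empty lists.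

-- ===== PORT A =====
-- the body of A's for-loop: state = (count_same_groups, current_number, current_count, distinct_numbers)
def stepA (s : Int × Int × Int × PySem.Set Int) (x : Int) : Int × Int × Int × PySem.Set Int :=
  if x == s.2.1 then (s.1, s.2.1, s.2.2.1 + 1, PySem.Set.add s.2.2.2 x)
  else ((if s.2.2.1 > 1 then s.1 + 1 else s.1), x, 1, PySem.Set.add s.2.2.2 x)

-- A raises IndexError on [] (sequence[0]); that input is outside Pre_solve, the [] branch value is arbitrary.
def solve (sequence : List Int) : Int × Int :=
  match sequence with
  | [] => (0, 0)
  | c0 :: rest =>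
      let st := rest.foldl stepA (0, c0, 1, PySem.Set.add PySem.Set.empty c0)
      ((if st.2.2.1 > 1 then st.1 + 1 else st.1), PySem.Set.len st.2.2.2)

-- ===== PORT B =====
def solve_alt (sequence : List Int) : Int × Int :=
  let eq : List Bool := (sequence.zip (PySem.List.slice sequence (some 1) none)).map (fun p => p.1 == p.2)
  let runs : Int :=
    (eq.map (fun b => if b then (1 : Int) else 0)).sum
      - ((eq.zip (PySem.List.slice eq (some 1) none)).map (fun p => if p.1 && p.2 then (1 : Int) else 0)).sum
  (runs, PySem.Set.len (PySem.Set.ofList sequence))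

-- ===== PRECONDITION & SPEC =====
-- Pre_ excludes exactly the empty list, on which A raises IndexError (it indexes sequence[0]).
def Pre_solve (sequence : List Int) : Prop := sequence ≠ []
instance (sequence : List Int) : Decidable (Pre_solve sequence) := by unfold Pre_solve; infer_instance
def pvWitness_solve : List Int := [1, 1, 2]

def Spec_solve (sequence : List Int) (out : Int × Int) : Prop := out = solve_alt sequence
instance (sequence : List Int) (out : Int × Int) : Decidable (Spec_solve sequence out) := by unfold Spec_solve; infer_instance

-- ===== CLAIM (what is proved, stated in full; the proofs are below) =====
def Claim_equal_solve : Prop := ∀ (sequence : List Int), Dom_solve sequence → Pre_solve sequence → Spec_solve sequence (solve sequence)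

-- ===== LEMMAS AND PROOFS =====

-- the run count A's loop produces, with current_count abstracted to "current run already has length > 1"
def loopF (cur : Int) (b : Bool) : List Int → Int
  | [] => if b then 1 else 0
  | x :: xs => if x = cur then loopF cur true xs else (if b then 1 else 0) + loopF x false xs

def pairCnt : List Int → Int
  | x :: y :: t => (if x = y then 1 else 0) + pairCnt (y :: t)
  | _ => 0

def tripCnt : List Int → Int
  | x :: y :: z :: t => (if x = y ∧ y = z then 1 else 0) + tripCnt (y :: z :: t)
  | _ => 0

theorem foldA (xs : List Int) (g cur cnt : Int) (d : PySem.Set Int) (hc : 1 ≤ cnt) :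
    ((if (xs.foldl stepA (g, cur, cnt, d)).2.2.1 > 1
        then (xs.foldl stepA (g, cur, cnt, d)).1 + 1
        else (xs.foldl stepA (g, cur, cnt, d)).1)
      = g + loopF cur (decide (1 < cnt)) xs)
    ∧ (xs.foldl stepA (g, cur, cnt, d)).2.2.2 = xs.foldl PySem.Set.add d := by
  induction xs generalizing g cur cnt d with
  | nil =>
      refine ⟨?_, rfl⟩
      simp only [List.foldl_nil, loopF]
      by_cases hb : (1:Int) < cnt <;> simp [hb]
  | cons x xs ih =>
      simp only [List.foldl_cons]
      by_cases h : x = cur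
      · rw [show stepA (g, cur, cnt, d) x = (g, cur, cnt + 1, PySem.Set.add d x) from by
            simp [stepA, h]]
        obtain ⟨h1, h2⟩ := ih g cur (cnt + 1) (PySem.Set.add d x) (by omega)
        refine ⟨?_, by simpa [h] using h2⟩
        rw [h1, decide_eq_true (show (1:Int) < cnt + 1 by omega)]
        simp [loopF, h]
      · rw [show stepA (g, cur, cnt, d) x
              = ((if cnt > 1 then g + 1 else g), x, 1, PySem.Set.add d x) from by
            simp [stepA, h]]
        obtain ⟨h1, h2⟩ := ih (if cnt > 1 then g + 1 else g) x 1 (PySem.Set.add d x) (by omega)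
        refine ⟨?_, h2⟩
        rw [h1]
        simp only [loopF, h, if_false]
        by_cases hb : (1:Int) < cnt
        · rw [decide_eq_true hb]
          simp [show cnt > 1 from hb]
          ring
        · rw [decide_eq_false hb]
          simp [show ¬ cnt > 1 from hb]

theorem loopF_closed (xs : List Int) (cur : Int) (b : Bool) :
    loopF cur b xs
      = (if b = true ∧ xs.head? ≠ some cur then 1 else 0) + pairCnt (cur :: xs) - tripCnt (cur :: xs) := by
  induction xs generalizing cur b with
  | nil => cases b <;> simp [loopF, pairCnt, tripCnt]
  | cons x xs ih =>
      by_cases h : x = cur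
      · subst h
        simp only [loopF, reduceIte]
        rw [ih]
        cases xs with
        | nil => cases b <;> simp [pairCnt, tripCnt]
        | cons z t =>
            simp only [List.head?_cons, pairCnt, tripCnt]
            by_cases hz : z = x <;> cases b <;> simp [hz] <;> omega
      · simp only [loopF, if_neg h]
        rw [ih]
        have h' : ¬ (cur = x) := fun hh => h hh.symm
        cases xs <;> cases b <;> simp [pairCnt, tripCnt, h, h'] <;> omega

def eqList (xs : List Int) : List Bool := (xs.zip xs.tail).map (fun p => p.1 == p.2)

theorem sum_eqList (xs : List Int) :
    ((eqList xs).map (fun b => if b then (1 : Int) else 0)).sum = pairCnt xs := by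
  induction xs with
  | nil => simp [eqList, pairCnt]
  | cons x xs ih =>
      cases xs with
      | nil => simp [eqList, pairCnt]
      | cons y t =>
          simp only [eqList, List.tail_cons, List.zip_cons_cons, List.map_cons, List.sum_cons,
            pairCnt] at *
          rw [← ih]
          by_cases h : x = y <;> simp [h]

theorem sum_trip (xs : List Int) :
    (((eqList xs).zip (eqList xs).tail).map (fun p => if p.1 && p.2 then (1 : Int) else 0)).sum
      = tripCnt xs := by
  induction xs with
  | nil => simp [eqList, tripCnt]
  | cons x xs ih =>
      cases xs with
      | nil => simp [eqList, tripCnt]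
      | cons y t =>
          cases t with
          | nil => simp [eqList, tripCnt]
          | cons z u =>
              simp only [eqList, List.tail_cons, List.zip_cons_cons, List.map_cons,
                List.sum_cons, tripCnt] at *
              rw [← ih]
              by_cases h1 : x = y <;> by_cases h2 : y = z <;> simp [h1, h2]

theorem solve_alt_closed (xs : List Int) :
    solve_alt xs = (pairCnt xs - tripCnt xs, PySem.Set.len (PySem.Set.ofList xs)) := by
  simp only [solve_alt, PySem.List.slice_from_one]
  rw [show ((xs.zip xs.tail).map (fun p => p.1 == p.2)) = eqList xs from rfl,
    sum_eqList, sum_trip]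

theorem solve_spec : Claim_equal_solve := by
  intro sequence _ hpre
  unfold Spec_solve
  cases sequence with
  | nil => exact absurd rfl hpre
  | cons c0 rest =>
      rw [solve_alt_closed]
      simp only [solve]
      obtain ⟨h1, h2⟩ := foldA rest 0 c0 1 (PySem.Set.add PySem.Set.empty c0) (by omega)
      rw [Prod.mk.injEq]
      constructor
      · rw [h1, decide_eq_false (show ¬ (1:Int) < 1 by omega), loopF_closed]
        simp
      · rw [h2]
        rfl
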